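-- pv_equiv track=rewrite | github.com/Maria-Liakata-NLP-Group/CLPsych-2026 | evaluation/scripts/validate_submission.py | check_post_text
-- ===== SOURCE A (Python) =====
-- POST_TEXT_KEYS = {"post", "post_text", "text", "content", "body", "Post Summary"}
--
-- def check_post_text(data, task_name):
--     """Warn if any entry contains fields that look like post text."""
--     warnings = []
--     flagged = 0
--     for i, entry in enumerate(data):
--         found_keys = [k for k in entry if k in POST_TEXT_KEYS]
--         if found_keys:
--             flagged += 1
--             if flagged <= 3:
--                 warnings.append(
--                     "Entry %d: contains text field(s) %s — please remove before submitting"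
--                     % (i, found_keys))
--     if flagged > 3:
--         warnings.append("... and %d more entries with text fields" % (flagged - 3))
--     if flagged > 0:
--         warnings.insert(0,
--             "WARNING: %d %s entries contain post text. "
--             "For privacy reasons, please remove all post text fields "
--             "(e.g., 'post', 'text', 'body') before uploading your submission."
--             % (flagged, task_name))
--     return warnings
-- ===== SOURCE B (Python) =====
-- POST_TEXT_KEYS = {"post", "post_text", "text", "content", "body", "Post Summary"}
--
-- def _is_flagged(entry):
--     return any(k in POST_TEXT_KEYS for k in entry)
--
-- def check_post_text(data, task_name):
--     """Warn if any entry contains fields that look like post text."""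
--     # Pass 1: just COUNT the flagged entries (a pure any-test, no key lists built).
--     count = sum(1 for entry in data if _is_flagged(entry))
--     if count == 0:
--         return []
--     warnings = ["WARNING: %d %s entries contain post text. "
--                 "For privacy reasons, please remove all post text fields "
--                 "(e.g., 'post', 'text', 'body') before uploading your submission."
--                 % (count, task_name)]
--     # Pass 2: detail only the first three flagged entries, stopping early;
--     # offending key lists are materialised for these three entries only.
--     shown = 0
--     for i, entry in enumerate(data):
--         if shown == 3:
--             break
--         if _is_flagged(entry):
--             warnings.append(
--                 "Entry %d: contains text field(s) %s — please remove before submitting"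
--                 % (i, [k for k in entry if k in POST_TEXT_KEYS]))
--             shown += 1
--     if count > 3:
--         warnings.append("... and %d more entries with text fields" % (count - 3))
--     return warnings
-- ===== Notes on version B (the rewrite author's own statement) =====
-- stated objective: alternative
-- what changed: A runs one stateful loop that interleaves a counter, capped message emission and a post-hoc insert(0) of the header; B first counts the flagged entries with a pure any()-test (building no key lists), then — only when the count is nonzero — starts the report with the header and makes a second early-exiting scan that materialises the offending key lists for at most the first three flagged entries.
import Mathlib
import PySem

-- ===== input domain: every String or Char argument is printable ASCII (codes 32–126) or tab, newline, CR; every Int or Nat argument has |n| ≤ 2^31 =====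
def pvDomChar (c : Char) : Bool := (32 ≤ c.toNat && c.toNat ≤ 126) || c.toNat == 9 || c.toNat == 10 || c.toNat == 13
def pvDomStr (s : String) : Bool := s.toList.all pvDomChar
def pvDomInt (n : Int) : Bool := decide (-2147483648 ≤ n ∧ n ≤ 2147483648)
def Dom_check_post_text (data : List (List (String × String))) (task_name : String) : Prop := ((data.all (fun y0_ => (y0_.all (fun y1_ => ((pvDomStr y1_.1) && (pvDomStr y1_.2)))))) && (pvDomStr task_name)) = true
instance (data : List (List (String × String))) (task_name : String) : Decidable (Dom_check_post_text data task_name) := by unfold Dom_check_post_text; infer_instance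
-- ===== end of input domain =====

-- B replaces A's single stateful loop (counter + capped emission + insert(0)) by a pure
-- counting pass followed by an early-exiting detail scan over at most the first three
-- flagged entries; same return value.

-- shared string-formatting helpers (Python's %d / %s-of-a-list-of-str, exact on the ASCII domain)
def POST_TEXT_KEYS : List String := ["post", "post_text", "text", "content", "body", "Post Summary"]

-- repr(s) for the printable-ASCII + tab/newline/CR strings of the domain
def pyReprChars (s : List Char) : List Char :=
  let q : Char := if s.contains '\'' && !s.contains '"' then '"' else '\''
  [q] ++ (s.flatMap (fun c =>
    if c = '\\' then ['\\', '\\']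
    else if c = q then ['\\', q]
    else if c = '\r' then ['\\', 'r']
    else if c = '\n' then ['\\', 'n']
    else if c = '\t' then ['\\', 't']
    else [c])) ++ [q]

-- str(list_of_str): "['a', 'b']"
def pyReprStrList (ks : List String) : List Char :=
  ['['] ++ List.intercalate (", ".toList) (ks.map (fun k => pyReprChars k.toList)) ++ [']']

-- "Entry %d: contains text field(s) %s — please remove before submitting" % (i, found_keys)
def entryMsg (i : Int) (ks : List String) : String :=
  String.ofList ("Entry ".toList ++ PySem.Int.toChars i ++ ": contains text field(s) ".toList
    ++ pyReprStrList ks ++ " — please remove before submitting".toList)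

-- the WARNING header % (flagged, task_name)
def headerMsg (count : Int) (task_name : String) : String :=
  String.ofList ("WARNING: ".toList ++ PySem.Int.toChars count ++ [' '] ++ task_name.toList
    ++ " entries contain post text. For privacy reasons, please remove all post text fields (e.g., 'post', 'text', 'body') before uploading your submission.".toList)

-- "... and %d more entries with text fields" % n
def moreMsg (n : Int) : String :=
  String.ofList ("... and ".toList ++ PySem.Int.toChars n ++ " more entries with text fields".toList)

-- [k for k in entry if k in POST_TEXT_KEYS]  (entry is a dict: keys = first-occurrence dedup)
def foundKeys (entry : List (String × String)) : List String :=
  (PySem.List.dedup (entry.map Prod.fst)).filter (fun k => POST_TEXT_KEYS.contains k)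

-- ===== PORT A =====
def check_post_text (data : List (List (String × String))) (task_name : String) : List String :=
  let st := (PySem.List.enumerate data).foldl
    (fun (st : List String × Nat) (p : Int × List (String × String)) =>
      let fk := foundKeys p.2
      if !fk.isEmpty then
        let flagged := st.2 + 1
        if flagged ≤ 3 then (st.1 ++ [entryMsg p.1 fk], flagged) else (st.1, flagged)
      else st) ([], 0)
  let warnings := if st.2 > 3 then st.1 ++ [moreMsg ((st.2 : Int) - 3)] else st.1
  if st.2 > 0 then headerMsg (st.2 : Int) task_name :: warnings else warnings

-- ===== PORT B =====
-- any(k in POST_TEXT_KEYS for k in entry)   (iterating a dict yields its deduped keys)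
def isFlagged (entry : List (String × String)) : Bool :=
  (PySem.List.dedup (entry.map Prod.fst)).any (fun k => POST_TEXT_KEYS.contains k)

-- B's second pass: detail the first three flagged entries, stopping early (shown = 3 → break)
def detailLoop : List (Int × List (String × String)) → Nat → List String
  | [], _ => []
  | p :: rest, shown =>
    if shown = 3 then []
    else if isFlagged p.2 then entryMsg p.1 (foundKeys p.2) :: detailLoop rest (shown + 1)
    else detailLoop rest shown

def check_post_text_alt (data : List (List (String × String))) (task_name : String) : List String :=
  let count := data.foldl (fun (n : Int) entry => if isFlagged entry then n + 1 else n) 0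
  if count = 0 then []
  else
    (headerMsg count task_name :: detailLoop (PySem.List.enumerate data) 0)
      ++ (if count > 3 then [moreMsg (count - 3)] else [])

-- ===== PRECONDITION & SPEC =====
def Spec_check_post_text (data : List (List (String × String))) (task_name : String) (out : List String) : Prop := out = check_post_text_alt data task_name
instance (data : List (List (String × String))) (task_name : String) (out : List String) : Decidable (Spec_check_post_text data task_name out) := by unfold Spec_check_post_text; infer_instance

-- ===== CLAIM (what is proved, stated in full; the proofs are below) =====
def Claim_equal_check_post_text : Prop := ∀ (data : List (List (String × String))) (task_name : String), Dom_check_post_text data task_name → Spec_check_post_text data task_name (check_post_text data task_name)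

-- ===== LEMMAS AND PROOFS =====

-- the flagged entries of a suffix, with their offending keys
def flagOf (l : List (Int × List (String × String))) : List (Int × List String) :=
  (l.filter (fun p => !(foundKeys p.2).isEmpty)).map (fun p => (p.1, foundKeys p.2))

theorem any_eq_filter_ne (l : List String) (p : String → Bool) :
    l.any p = !(l.filter p).isEmpty := by
  induction l with
  | nil => simp
  | cons x t ih => by_cases hx : p x = true <;> simp [hx, ih]

theorem isFlagged_eq (entry : List (String × String)) :
    isFlagged entry = !(foundKeys entry).isEmpty := by
  simp only [isFlagged, foundKeys]
  exact any_eq_filter_ne _ _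

-- A's loop, started from a state describing an already-flagged list F, ends in the
-- state describing F ++ flagOf rest (messages = first three flagged, count = length)
theorem A_loop_inv (rest : List (Int × List (String × String))) (F : List (Int × List String)) :
    rest.foldl
      (fun (st : List String × Nat) (p : Int × List (String × String)) =>
        let fk := foundKeys p.2
        if !fk.isEmpty then
          let flagged := st.2 + 1
          if flagged ≤ 3 then (st.1 ++ [entryMsg p.1 fk], flagged) else (st.1, flagged)
        else st)
      ((F.take 3).map (fun q => entryMsg q.1 q.2), F.length)
    = (((F ++ flagOf rest).take 3).map (fun q => entryMsg q.1 q.2), (F ++ flagOf rest).length) := by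
  induction rest generalizing F with
  | nil => simp [flagOf]
  | cons p rest ih =>
    by_cases h : (foundKeys p.2).isEmpty
    · simp only [List.foldl_cons]
      rw [if_neg (by simp [h])]
      simpa [flagOf, List.filter_cons, h] using ih F
    · have hb : (!(foundKeys p.2).isEmpty) = true := by simp [h]
      have this' := ih (F ++ [(p.1, foundKeys p.2)])
      rw [show (F ++ [(p.1, foundKeys p.2)]).length = F.length + 1 from by simp] at this'
      simp only [List.foldl_cons]
      rw [if_pos hb]
      by_cases h3 : F.length + 1 ≤ 3
      · rw [if_pos h3]
        have hs : ((F ++ [(p.1, foundKeys p.2)]).take 3).map (fun q => entryMsg q.1 q.2)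
            = (F.take 3).map (fun q => entryMsg q.1 q.2) ++ [entryMsg p.1 (foundKeys p.2)] := by
          rw [List.take_of_length_le (by simp; omega), List.take_of_length_le (by omega)]
          simp
        rw [hs] at this'
        rw [this']
        simp [flagOf, h]
      · rw [if_neg h3]
        have hs : ((F ++ [(p.1, foundKeys p.2)]).take 3).map (fun q => entryMsg q.1 q.2)
            = (F.take 3).map (fun q => entryMsg q.1 q.2) := by
          rw [List.take_append_of_le_length (by omega)]
        rw [hs] at this'
        rw [this']
        simp [flagOf, h]

-- B's counting pass equals the number of flagged entries
theorem count_eq (data : List (List (String × String))) :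
    data.foldl (fun (n : Int) entry => if isFlagged entry then n + 1 else n) 0
      = ((flagOf (PySem.List.enumerate data)).length : Int) := by
  rw [PySem.List.foldl_count_if]
  have henum : ∀ (s : Int), (PySem.List.enumerate data s).countP (fun p => !(foundKeys p.2).isEmpty)
      = data.countP (fun e => !(foundKeys e).isEmpty) := by
    intro s
    induction data generalizing s with
    | nil => simp [PySem.List.enumerate_nil]
    | cons e t ih => simp [PySem.List.enumerate_cons, List.countP_cons, ih]
  have hcp : data.countP isFlagged = data.countP (fun e => !(foundKeys e).isEmpty) :=
    List.countP_congr (fun e _ => by rw [isFlagged_eq])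
  simp only [flagOf, List.length_map, ← List.countP_eq_length_filter, zero_add,
    hcp, henum 0]

-- B's detail scan yields the first (3 - shown) flagged messages
theorem detailLoop_eq (l : List (Int × List (String × String))) (shown : Nat) (h : shown ≤ 3) :
    detailLoop l shown = ((flagOf l).take (3 - shown)).map (fun q => entryMsg q.1 q.2) := by
  induction l generalizing shown with
  | nil => simp [detailLoop, flagOf]
  | cons p rest ih =>
    by_cases h3 : shown = 3
    · simp [detailLoop, h3]
    · have hlt : shown < 3 := by omega
      by_cases hf : (foundKeys p.2).isEmpty
      · simp [detailLoop, h3, isFlagged_eq, hf, flagOf, ih shown h]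
      · have : 3 - shown = (3 - (shown + 1)) + 1 := by omega
        simp [detailLoop, h3, isFlagged_eq, hf, flagOf, this,
          ih (shown + 1) (by omega)]

-- ===== VERDICT (by name: the statement is the Claim_ definition above) =====
theorem check_post_text_spec : Claim_equal_check_post_text := by
  intro data task_name _hdom
  unfold Spec_check_post_text check_post_text check_post_text_alt
  have h := A_loop_inv (PySem.List.enumerate data) []
  simp only [List.take_nil, List.map_nil, List.length_nil, List.nil_append] at h
  rw [h, count_eq, detailLoop_eq (PySem.List.enumerate data) 0 (by omega)]
  set G := flagOf (PySem.List.enumerate data) with hG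
  rcases Nat.eq_zero_or_pos G.length with h0 | hpos
  · simp [List.eq_nil_of_length_eq_zero h0]
  · have hne : G.length ≠ 0 := Nat.pos_iff_ne_zero.mp hpos
    simp only [if_pos hpos, Nat.sub_zero]
    have hnil : G ≠ [] := List.ne_nil_of_length_pos hpos
    by_cases h3 : G.length > 3
    · simp [h3, hnil]
    · simp [h3, hnil]
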